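-- pv_equiv track=rewrite | github.com/historyViper/mod30-spinor | verify_chirality_theorem.py | linearized_chirality
-- ===== SOURCE A (Python) =====
-- def linearized_chirality(cycle, m):
--     """
--     Compute the LINEARIZED chirality (startpoint-dependent).
--     Omits the closing transition (as in the computational tables).
--     Uses the raw cycle list to extract directions WITHOUT the
--     wrap-around from last vertex back to first.
--     """
--     coords = cycle[:-1]  # Remove duplicate endpoint
--     dirs = []
--     for t in range(len(coords) - 1):
--         v = coords[t]
--         w = coords[t + 1]
--         di = (w[0] - v[0]) % m
--         dj = (w[1] - v[1]) % m
--         dk = (w[2] - v[2]) % m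
--         if di == 1: dirs.append(0)
--         elif dj == 1: dirs.append(1)
--         else: dirs.append(2)
--
--     cw, ccw = 0, 0
--     for t in range(len(dirs) - 1):
--         d1 = dirs[t]
--         d2 = dirs[t + 1]
--         if d1 != d2:
--             if (d2 - d1) % 3 == 1:
--                 cw += 1
--             else:
--                 ccw += 1
--     return cw, ccw, cw - ccw
-- ===== SOURCE B (Python) =====
-- def linearized_chirality(cycle, m):
--     """Single fused pass over consecutive coordinate pairs, carrying only the
--     previous direction label instead of materializing the dirs list."""
--     coords = cycle[:-1]
--     cw = ccw = 0
--     prev = None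
--     for v, w in zip(coords, coords[1:]):
--         if (w[0] - v[0]) % m == 1:
--             cur = 0
--         elif (w[1] - v[1]) % m == 1:
--             cur = 1
--         else:
--             cur = 2
--         if prev is not None and cur != prev:
--             if (cur - prev) % 3 == 1:
--                 cw += 1
--             else:
--                 ccw += 1
--         prev = cur
--     return cw, ccw, cw - ccw
-- ===== Notes on version B (the rewrite author's own statement) =====
-- stated objective: alternative
-- what changed: B fuses A's two passes (build the full dirs list by index, then scan adjacent pairs of it by index) into one pass over zipped consecutive coordinate pairs that carries only the previous direction label, never materializing the dirs list.
import Mathlib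
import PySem

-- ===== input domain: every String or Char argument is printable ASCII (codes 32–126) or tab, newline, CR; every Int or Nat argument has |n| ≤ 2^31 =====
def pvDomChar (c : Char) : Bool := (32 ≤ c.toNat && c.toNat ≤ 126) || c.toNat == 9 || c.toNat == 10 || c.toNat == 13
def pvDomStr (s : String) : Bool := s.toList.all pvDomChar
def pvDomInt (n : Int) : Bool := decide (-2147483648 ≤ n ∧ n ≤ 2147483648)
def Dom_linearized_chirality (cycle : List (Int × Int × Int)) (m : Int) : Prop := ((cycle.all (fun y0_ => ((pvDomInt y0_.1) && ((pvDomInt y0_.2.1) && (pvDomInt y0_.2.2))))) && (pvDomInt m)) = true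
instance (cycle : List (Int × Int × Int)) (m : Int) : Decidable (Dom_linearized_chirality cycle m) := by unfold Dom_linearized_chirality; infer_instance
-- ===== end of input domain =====

-- B fuses A's two index loops (build the dirs list, then scan its adjacent pairs)
-- into one pass over zipped consecutive coordinate pairs carrying only the previous
-- direction label (objective: alternative decomposition, same O(n) cost).

-- ===== PORT A =====
def linearized_chirality (cycle : List (Int × Int × Int)) (m : Int) : Int × Int × Int :=
  let coords := PySem.List.slice cycle none (some (-1))
  let dirs : List Int := (PySem.List.pyRange 0 ((coords.length : Int) - 1) 1).foldl
    (fun dirs t =>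
      let v := PySem.List.pyGetD coords t (0, 0, 0)
      let w := PySem.List.pyGetD coords (t + 1) (0, 0, 0)
      let di := PySem.Int.mod (w.1 - v.1) m
      let dj := PySem.Int.mod (w.2.1 - v.2.1) m
      let _dk := PySem.Int.mod (w.2.2 - v.2.2) m
      if di = 1 then dirs ++ [0]
      else if dj = 1 then dirs ++ [1]
      else dirs ++ [2]) []
  let p := (PySem.List.pyRange 0 ((dirs.length : Int) - 1) 1).foldl
    (fun (p : Int × Int) t =>
      let d1 := PySem.List.pyGetD dirs t 0
      let d2 := PySem.List.pyGetD dirs (t + 1) 0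
      if d1 ≠ d2 then
        if PySem.Int.mod (d2 - d1) 3 = 1 then (p.1 + 1, p.2) else (p.1, p.2 + 1)
      else p) (0, 0)
  (p.1, p.2, p.1 - p.2)

-- ===== PORT B =====
def linearized_chirality_alt (cycle : List (Int × Int × Int)) (m : Int) : Int × Int × Int :=
  let coords := PySem.List.slice cycle none (some (-1))
  let st := (coords.zip (PySem.List.slice coords (some 1) none)).foldl
    (fun (st : Int × Int × Option Int) vw =>
      let cur : Int :=
        if PySem.Int.mod (vw.2.1 - vw.1.1) m = 1 then 0
        else if PySem.Int.mod (vw.2.2.1 - vw.1.2.1) m = 1 then 1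
        else 2
      match st.2.2 with
      | some prev =>
        if cur ≠ prev then
          if PySem.Int.mod (cur - prev) 3 = 1 then (st.1 + 1, st.2.1, some cur)
          else (st.1, st.2.1 + 1, some cur)
        else (st.1, st.2.1, some cur)
      | none => (st.1, st.2.1, some cur)) ((0 : Int), (0 : Int), (none : Option Int))
  (st.1, st.2.1, st.1 - st.2.1)

-- ===== PRECONDITION & SPEC =====
-- Pre_ excludes only the inputs on which A raises ZeroDivisionError: m = 0 with at
-- least 3 cycle entries (the direction loop then executes '% 0'). B raises there too.
def Pre_linearized_chirality (cycle : List (Int × Int × Int)) (m : Int) : Prop :=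
  m ≠ 0 ∨ cycle.length < 3
instance (cycle : List (Int × Int × Int)) (m : Int) : Decidable (Pre_linearized_chirality cycle m) := by unfold Pre_linearized_chirality; infer_instance

def pvWitness_linearized_chirality : (List (Int × Int × Int)) × Int :=
  ([(0, 0, 0), (1, 0, 0), (1, 1, 0), (0, 1, 0), (0, 0, 0)], 5)

def Spec_linearized_chirality (cycle : List (Int × Int × Int)) (m : Int) (out : Int × Int × Int) : Prop := out = linearized_chirality_alt cycle m
instance (cycle : List (Int × Int × Int)) (m : Int) (out : Int × Int × Int) : Decidable (Spec_linearized_chirality cycle m out) := by unfold Spec_linearized_chirality; infer_instance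

-- ===== CLAIM (what is proved, stated in full; the proofs are below) =====
def Claim_equal_linearized_chirality : Prop := ∀ (cycle : List (Int × Int × Int)) (m : Int), Dom_linearized_chirality cycle m → Pre_linearized_chirality cycle m → Spec_linearized_chirality cycle m (linearized_chirality cycle m)

-- ===== LEMMAS AND PROOFS =====

-- fold over 'for t in range(len xs - 1): use xs[t], xs[t+1]' = fold over zipped consecutive pairs
theorem foldl_pyRange_adjacent {α β : Type} (xs : List α) (d : α) (f : β → α → α → β) (init : β) :
    (PySem.List.pyRange 0 ((xs.length : Int) - 1) 1).foldl
      (fun acc t => f acc (PySem.List.pyGetD xs t d) (PySem.List.pyGetD xs (t + 1) d)) init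
    = (xs.zip xs.tail).foldl (fun acc vw => f acc vw.1 vw.2) init := by
  rcases xs with _ | ⟨x, t⟩
  · rw [PySem.List.pyRange_one_eq_nil (by norm_num)]
    simp
  · have hlen : ((x :: t).zip t).length = t.length := by simp
    have hb : ((x :: t).length : Int) - 1 = (((x :: t).zip t).length : Int) := by simp
    rw [List.tail_cons, hb]
    have hcongr : ∀ (acc : β), ∀ i ∈ PySem.List.pyRange 0 ((((x :: t).zip t).length : Int)) 1,
        f acc (PySem.List.pyGetD (x :: t) i d) (PySem.List.pyGetD (x :: t) (i + 1) d)
        = (fun acc vw => f acc vw.1 vw.2) acc (PySem.List.pyGetD ((x :: t).zip t) i (d, d)) := by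
      intro acc i hi
      rw [PySem.List.mem_pyRange_one] at hi
      obtain ⟨h0, h1⟩ := hi
      rw [hlen] at h1
      have h1' : i < ((x :: t).length : Int) := by simp; omega
      have h2' : i + 1 < ((x :: t).length : Int) := by simp; omega
      have hz : i < (((x :: t).zip t).length : Int) := by rw [hlen]; exact h1
      rw [PySem.List.pyGetD_eq_getElem _ _ h0 h1', PySem.List.pyGetD_eq_getElem _ _ (by omega) h2',
        PySem.List.pyGetD_eq_getElem _ _ h0 hz]
      simp only [List.getElem_zip]
      have hn : (i + 1).toNat = i.toNat + 1 := by omega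
      congr 1
      simp [hn]
    rw [PySem.List.foldl_congr_mem _ _ _ init hcongr]
    simpa using PySem.List.foldl_pyRange_zero_pyGetD' ((x :: t).zip t) (d, d) (fun acc vw => f acc vw.1 vw.2) init

-- the direction label of one coordinate step (shared characterisation of both ports)
def pvDir (m : Int) (vw : (Int × Int × Int) × (Int × Int × Int)) : Int :=
  if PySem.Int.mod (vw.2.1 - vw.1.1) m = 1 then 0
  else if PySem.Int.mod (vw.2.2.1 - vw.1.2.1) m = 1 then 1
  else 2

-- A's transition step on a pair of adjacent labels
def pvStep (p : Int × Int) (d1 d2 : Int) : Int × Int :=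
  if d1 ≠ d2 then
    if PySem.Int.mod (d2 - d1) 3 = 1 then (p.1 + 1, p.2) else (p.1, p.2 + 1)
  else p

-- B's loop body (definitionally the lambda inside linearized_chirality_alt)
def pvAltF (m : Int) (st : Int × Int × Option Int) (vw : (Int × Int × Int) × (Int × Int × Int)) : Int × Int × Option Int :=
  let cur : Int := pvDir m vw
  match st.2.2 with
  | some prev =>
    if cur ≠ prev then
      if PySem.Int.mod (cur - prev) 3 = 1 then (st.1 + 1, st.2.1, some cur)
      else (st.1, st.2.1 + 1, some cur)
    else (st.1, st.2.1, some cur)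
  | none => (st.1, st.2.1, some cur)

-- B's fold from a known previous label counts the transitions of prev :: labels
theorem alt_fold_some (m : Int) (cs : List ((Int × Int × Int) × (Int × Int × Int)))
    (pr : Int) (p : Int × Int) :
    cs.foldl (pvAltF m) (p.1, p.2, some pr)
    = (let ds := pr :: cs.map (pvDir m)
       let q := (ds.zip ds.tail).foldl (fun acc vw => pvStep acc vw.1 vw.2) p
       (q.1, q.2, some (ds.getLast (by simp)))) := by
  induction cs generalizing pr p with
  | nil => simp
  | cons c rest ih =>
    have hstep : pvAltF m (p.1, p.2, some pr) c
        = ((pvStep p pr (pvDir m c)).1, (pvStep p pr (pvDir m c)).2, some (pvDir m c)) := by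
      simp only [pvAltF, pvStep, ne_eq]
      rcases eq_or_ne (pvDir m c) pr with h | h
      · simp [h]
      · simp only [h, h.symm, not_false_iff]
        split_ifs <;> rfl
    simp only [List.foldl_cons, hstep]
    rw [ih (pvDir m c) (pvStep p pr (pvDir m c))]
    simp only [List.map_cons, List.tail_cons, List.zip_cons_cons, List.foldl_cons]
    congr 1

-- A's dirs-building loop produces the map of pvDir over consecutive pairs
theorem dirs_eq (coords : List (Int × Int × Int)) (m : Int) :
    ((PySem.List.pyRange 0 ((coords.length : Int) - 1) 1).foldl
      (fun dirs t =>
        let v := PySem.List.pyGetD coords t (0, 0, 0)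
        let w := PySem.List.pyGetD coords (t + 1) (0, 0, 0)
        let di := PySem.Int.mod (w.1 - v.1) m
        let dj := PySem.Int.mod (w.2.1 - v.2.1) m
        let _dk := PySem.Int.mod (w.2.2 - v.2.2) m
        if di = 1 then dirs ++ [0]
        else if dj = 1 then dirs ++ [1]
        else dirs ++ [2]) ([] : List Int))
    = (coords.zip coords.tail).map (pvDir m) := by
  rw [foldl_pyRange_adjacent coords (0, 0, 0)
    (fun (dirs : List Int) v w =>
      let di := PySem.Int.mod (w.1 - v.1) m
      let dj := PySem.Int.mod (w.2.1 - v.2.1) m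
      let _dk := PySem.Int.mod (w.2.2 - v.2.2) m
      if di = 1 then dirs ++ [0]
      else if dj = 1 then dirs ++ [1]
      else dirs ++ [2]) []]
  have hb : ∀ (acc : List Int), ∀ vw ∈ coords.zip coords.tail,
      (fun (dirs : List Int) (vw : (Int × Int × Int) × (Int × Int × Int)) =>
        if PySem.Int.mod (vw.2.1 - vw.1.1) m = 1 then dirs ++ [0]
        else if PySem.Int.mod (vw.2.2.1 - vw.1.2.1) m = 1 then dirs ++ [1]
        else dirs ++ [2]) acc vw
      = acc ++ [pvDir m vw] := by
    intro acc vw _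
    simp only [pvDir]
    split_ifs <;> rfl
  rw [PySem.List.foldl_congr_mem _ _ _ [] hb]
  simpa using PySem.List.foldl_append_singleton_eq_map (pvDir m) (coords.zip coords.tail) []

theorem main_eq (cycle : List (Int × Int × Int)) (m : Int) :
    linearized_chirality cycle m = linearized_chirality_alt cycle m := by
  unfold linearized_chirality linearized_chirality_alt
  simp only [PySem.List.slice_to_neg_one, PySem.List.slice_from_one]
  rw [dirs_eq cycle.dropLast m]
  rw [foldl_pyRange_adjacent ((cycle.dropLast.zip cycle.dropLast.tail).map (pvDir m)) 0
    (fun (p : Int × Int) d1 d2 =>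
      if d1 ≠ d2 then
        if PySem.Int.mod (d2 - d1) 3 = 1 then (p.1 + 1, p.2) else (p.1, p.2 + 1)
      else p) (0, 0)]
  rcases hz : cycle.dropLast.zip cycle.dropLast.tail with _ | ⟨c, zs⟩
  · rfl
  · show _ = (let st := List.foldl (pvAltF m) ((0:Int), (0:Int), (none : Option Int)) (c :: zs);
      (st.1, st.2.1, st.1 - st.2.1))
    have h0 : List.foldl (pvAltF m) ((0:Int), (0:Int), (none : Option Int)) (c :: zs)
        = List.foldl (pvAltF m) ((((0:Int),(0:Int)) : Int × Int).1, (((0:Int),(0:Int)) : Int × Int).2, some (pvDir m c)) zs := by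
      rfl
    simp only [h0, alt_fold_some m zs (pvDir m c) ((0:Int),(0:Int))]
    simp only [List.map_cons, List.tail_cons, pvStep]

-- ===== VERDICT (by name: the statement is the Claim_ definition above) =====
theorem linearized_chirality_spec : Claim_equal_linearized_chirality := by
  intro cycle m _ _
  exact main_eq cycle m
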